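-- pv_equiv track=rewrite | github.com/AllaAndreevna/Yandex-Algo-Training-6.0 | HW2/HW2_task4.py | solution
-- ===== SOURCE A (Python) =====
-- def solution(n, k, ms):
--     a = sorted(ms)
--     left = 0
--     max_count = 0
--     for right in range(n):
--         while a[right] - a[left] > k:
--             left += 1
--         max_count = max(max_count, right - left + 1)
--     return max_count
-- ===== SOURCE B (Python) =====
-- def _upper(a, x):
--     lo, hi = 0, len(a)
--     while lo < hi:
--         mid = (lo + hi) // 2
--         if x < a[mid]:
--             hi = mid
--         else:
--             lo = mid + 1
--     return lo
--
-- def solution(n, k, ms):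
--     a = sorted(ms)[:n] if n > 0 else []
--     best = 0
--     for i, x in enumerate(a):
--         best = max(best, _upper(a, x + k) - i)
--     return best
-- ===== Notes on version B (the rewrite author's own statement) =====
-- stated objective: alternative
-- what changed: Replaced A's stateful two-pointer sweep over indices (a left pointer carried across iterations, inner while loop) with a stateless pass over enumerate of the sorted prefix that, for each element, counts the in-window elements by an independent hand-written upper-bound binary search from the left end.
import Mathlib
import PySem

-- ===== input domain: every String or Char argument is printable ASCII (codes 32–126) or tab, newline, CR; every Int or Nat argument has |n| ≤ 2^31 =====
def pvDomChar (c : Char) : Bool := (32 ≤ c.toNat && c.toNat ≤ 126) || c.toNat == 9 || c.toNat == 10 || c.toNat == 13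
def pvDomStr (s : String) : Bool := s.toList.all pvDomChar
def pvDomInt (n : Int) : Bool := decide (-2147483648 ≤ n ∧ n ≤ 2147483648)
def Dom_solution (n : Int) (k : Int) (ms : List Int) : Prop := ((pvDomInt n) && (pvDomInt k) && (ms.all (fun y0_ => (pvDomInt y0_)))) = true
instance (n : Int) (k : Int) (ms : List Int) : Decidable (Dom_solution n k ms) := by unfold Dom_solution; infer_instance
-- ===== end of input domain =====

-- B replaces A's stateful two-pointer sweep by a stateless pass over the sorted prefix that
-- counts each window with an independent upper-bound binary search (alternative, not faster).

-- ===== PORT A =====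
-- the inner `while a[right] - a[left] > k: left += 1`; fuel bounds the walk (inside Pre_ it
-- always stops before running past the end, so the fuel is never exhausted there)
def solWhile (a : List Int) (ar k : Int) : Nat → Nat → Nat
  | left, 0 => left
  | left, fuel+1 => if k < ar - a.getD left 0 then solWhile a ar k (left+1) fuel else left

def solution (n : Int) (k : Int) (ms : List Int) : Int :=
  let a := PySem.List.sorted ms (fun x => x)
  ((PySem.List.pyRange 0 n 1).foldl
    (fun (st : Nat × Int) right =>
      let left := solWhile a (PySem.List.pyGetD a right 0) k st.1 a.length
      (left, max st.2 (right - (left : Int) + 1))) (0, 0)).2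

-- ===== PORT B =====
-- literal port of Source B's hand-written _upper (bisect_right); lo/hi stay in [0, len], hence Nat;
-- fuel-based so the kernel can reduce it; hi - lo strictly decreases, fuel = a.length suffices
def ubLoop (a : List Int) (x : Int) : Nat → Nat → Nat → Nat
  | 0, lo, _ => lo
  | fuel+1, lo, hi =>
    if lo < hi then
      let mid := (lo + hi) / 2
      if x < a.getD mid 0 then ubLoop a x fuel lo mid else ubLoop a x fuel (mid+1) hi
    else lo

def solution_alt (n : Int) (k : Int) (ms : List Int) : Int :=
  let a := if 0 < n then PySem.List.slice (PySem.List.sorted ms (fun x => x)) none (some n) else []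
  (PySem.List.enumerate a 0).foldl
    (fun (best : Int) p => max best (((ubLoop a (p.2 + k) a.length 0 a.length : Nat) : Int) - p.1)) 0

-- ===== PRECONDITION & SPEC =====
-- Pre_ excludes exactly the inputs where A raises IndexError: n > len(ms), or 0 < n and the
-- n-th smallest of ms exceeds max(ms) + k (then the inner while walks past the end; only for k < 0).
def Pre_solution (n : Int) (k : Int) (ms : List Int) : Prop :=
  n ≤ (ms.length : Int) ∧
  (n ≤ 0 ∨
    PySem.List.pyGetD (PySem.List.sorted ms (fun x => x)) (n - 1) 0
      - PySem.List.pyGetD (PySem.List.sorted ms (fun x => x)) ((ms.length : Int) - 1) 0 ≤ k)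
instance (n : Int) (k : Int) (ms : List Int) : Decidable (Pre_solution n k ms) := by
  unfold Pre_solution; infer_instance
def pvWitness_solution : Int × Int × List Int := (3, 2, [5, 1, 4])

def Spec_solution (n : Int) (k : Int) (ms : List Int) (out : Int) : Prop := out = solution_alt n k ms
instance (n : Int) (k : Int) (ms : List Int) (out : Int) : Decidable (Spec_solution n k ms out) := by unfold Spec_solution; infer_instance

-- ===== CLAIM (what is proved, stated in full; the proofs are below) =====
def Claim_equal_solution : Prop := ∀ (n : Int) (k : Int) (ms : List Int), Dom_solution n k ms → Pre_solution n k ms → Spec_solution n k ms (solution n k ms)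

-- ===== LEMMAS AND PROOFS =====

theorem getD_mono_of_pairwise (a : List Int) (hs : a.Pairwise (· ≤ ·)) (i j : Nat)
    (hij : i ≤ j) (hj : j < a.length) : a.getD i 0 ≤ a.getD j 0 := by
  rcases Nat.lt_or_ge i j with h | h
  · rw [List.getD_eq_getElem a 0 (by omega), List.getD_eq_getElem a 0 hj]
    exact List.pairwise_iff_getElem.mp hs i j (by omega) hj h
  · have : i = j := by omega
    subst this; rfl

-- A's inner while reaches J, the least stop index, given enough fuel
theorem solWhile_eq (a : List Int) (ar k : Int) (J : Nat)
    (hJ : ∀ j, j < J → k < ar - a.getD j 0) (hstop : ar - a.getD J 0 ≤ k) :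
    ∀ fuel left, left ≤ J → J - left ≤ fuel → solWhile a ar k left fuel = J := by
  intro fuel
  induction fuel with
  | zero =>
    intro left h1 h2
    have : left = J := by omega
    subst this; rfl
  | succ fuel ih =>
    intro left h1 h2
    rcases Nat.lt_or_ge left J with h | h
    · simp only [solWhile, hJ left h, if_true]
      exact ih (left + 1) (by omega) (by omega)
    · have : left = J := by omega
      subst this
      simp only [solWhile, if_neg (by omega : ¬ k < ar - a.getD left 0)]

-- the least index l of a with x - a[l] ≤ k (l.length if none): characterisation of A's left pointer
def Lsc (x k : Int) : List Int → Nat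
  | [] => 0
  | v :: rest => if x - v ≤ k then 0 else Lsc x k rest + 1

theorem Lsc_lt (x k : Int) (l : List Int) : ∀ j, j < Lsc x k l → k < x - l.getD j 0 := by
  induction l with
  | nil => simp [Lsc]
  | cons v rest ih =>
    intro j hj
    simp only [Lsc] at hj
    split_ifs at hj with h
    · omega
    · cases j with
      | zero => simp only [List.getD_cons_zero]; omega
      | succ j => exact ih j (by omega)

theorem Lsc_stop (x k : Int) (l : List Int) (h : Lsc x k l < l.length) :
    x - l.getD (Lsc x k l) 0 ≤ k := by
  induction l with
  | nil => simp at h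
  | cons v rest ih =>
    simp only [Lsc] at h ⊢
    split_ifs with hc
    · simpa using hc
    · simp only [List.getD_cons_succ]
      exact ih (by simpa [Lsc, hc] using h)

theorem Lsc_le_of (x k : Int) (l : List Int) (j : Nat) (hj : j < l.length)
    (h : x - l.getD j 0 ≤ k) : Lsc x k l ≤ j := by
  induction l generalizing j with
  | nil => simp at hj
  | cons v rest ih =>
    simp only [Lsc]
    split_ifs with hc
    · omega
    · cases j with
      | zero => simp at h; omega
      | succ j =>
        have := ih j (by simpa using hj) (by simpa using h)
        omega

theorem Lsc_mono (x x' k : Int) (hx : x ≤ x') (l : List Int) : Lsc x k l ≤ Lsc x' k l := by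
  induction l with
  | nil => simp [Lsc]
  | cons v rest ih =>
    simp only [Lsc]
    split_ifs with h1 h2 h2
    · omega
    · omega
    · omega
    · omega

-- B's binary search: invariant-based specification
theorem ubLoop_spec (a : List Int) (hs : a.Pairwise (· ≤ ·)) (x : Int) :
    ∀ fuel lo hi, hi ≤ a.length → lo ≤ hi → hi - lo ≤ fuel →
    (∀ i, i < lo → a.getD i 0 ≤ x) → (∀ i, hi ≤ i → i < a.length → x < a.getD i 0) →
    lo ≤ ubLoop a x fuel lo hi ∧ ubLoop a x fuel lo hi ≤ hi ∧
      (∀ i, i < ubLoop a x fuel lo hi → a.getD i 0 ≤ x) ∧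
      (∀ i, ubLoop a x fuel lo hi ≤ i → i < a.length → x < a.getD i 0) := by
  intro fuel
  induction fuel with
  | zero =>
    intro lo hi hhi hlohi hfuel hle hgt
    have : lo = hi := by omega
    subst this
    simp only [ubLoop]
    exact ⟨le_refl _, le_refl _, hle, hgt⟩
  | succ fuel ih =>
    intro lo hi hhi hlohi hfuel hle hgt
    simp only [ubLoop]
    by_cases h : lo < hi
    · simp only [h, if_true]
      by_cases hm : x < a.getD ((lo + hi) / 2) 0
      · simp only [hm, if_true]
        have hrec := ih lo ((lo + hi) / 2) (by omega) (by omega) (by omega) hle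
          (fun i hi' hilen =>
            lt_of_lt_of_le hm (getD_mono_of_pairwise a hs ((lo + hi) / 2) i hi' hilen))
        exact ⟨hrec.1, by omega, hrec.2.2⟩
      · simp only [hm, if_false]
        push Not at hm
        have hrec := ih ((lo + hi) / 2 + 1) hi hhi (by omega) (by omega)
          (fun i hi' =>
            le_trans (getD_mono_of_pairwise a hs i ((lo + hi) / 2) (by omega) (by omega)) hm)
          hgt
        exact ⟨by omega, hrec.2.1, hrec.2.2⟩
    · simp only [h, if_false]
      have : lo = hi := by omega
      subst this
      exact ⟨le_refl _, le_refl _, hle, hgt⟩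

-- the full-range search: entries below the result are ≤ x, the rest are > x
theorem Uf_spec (a : List Int) (hs : a.Pairwise (· ≤ ·)) (x : Int) :
    ubLoop a x a.length 0 a.length ≤ a.length ∧
      (∀ i, i < ubLoop a x a.length 0 a.length → a.getD i 0 ≤ x) ∧
      (∀ i, ubLoop a x a.length 0 a.length ≤ i → i < a.length → x < a.getD i 0) := by
  have h := ubLoop_spec a hs x a.length 0 a.length (le_refl _) (by omega) (by omega)
    (fun i hi => absurd hi (by omega)) (fun i hi hilen => absurd hilen (by omega))
  exact ⟨h.2.1, h.2.2.1, h.2.2.2⟩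

-- generic facts about a max-accumulating fold
theorem le_foldl_max_init (f : Int → Int) (l : List Int) :
    ∀ init, init ≤ l.foldl (fun mc t => max mc (f t)) init := by
  induction l with
  | nil => intro init; simp
  | cons x xs ih =>
    intro init
    simp only [List.foldl_cons]
    exact le_trans (le_max_left _ _) (ih _)

theorem foldl_max_le (f : Int → Int) (l : List Int) (c : Int)
    (h : ∀ t ∈ l, f t ≤ c) : ∀ init, init ≤ c → l.foldl (fun mc t => max mc (f t)) init ≤ c := by
  induction l with
  | nil => intro init hi; simpa using hi
  | cons x xs ih =>
    intro init hi
    simp only [List.foldl_cons]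
    exact ih (fun t ht => h t (by simp [ht])) _ (max_le hi (h x (by simp)))

theorem le_foldl_max (f : Int → Int) (l : List Int) (t : Int) (ht : t ∈ l) :
    ∀ init, f t ≤ l.foldl (fun mc t => max mc (f t)) init := by
  induction l with
  | nil => simp at ht
  | cons x xs ih =>
    intro init
    simp only [List.foldl_cons]
    rcases List.mem_cons.mp ht with h | h
    · subst h
      exact le_trans (le_max_right _ _) (le_foldl_max_init f xs _)
    · exact ih h _

-- A's stateful fold equals the pure max-fold of the window sizes r - L r + 1
theorem Aloop (a : List Int) (k : Int) (N : Nat) (L : Nat → Nat)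
    (hLstop : ∀ r, r < N → a.getD r 0 - a.getD (L r) 0 ≤ k)
    (hLlt : ∀ r, r < N → ∀ j, j < L r → k < a.getD r 0 - a.getD j 0)
    (hLmono : ∀ r s, r ≤ s → s < N → L r ≤ L s)
    (hLlen : ∀ r, r < N → L r ≤ a.length) :
    ∀ m, m ≤ N →
    ((PySem.List.pyRange 0 (m : Int) 1).foldl
      (fun (st : Nat × Int) right =>
        let left := solWhile a (PySem.List.pyGetD a right 0) k st.1 a.length
        (left, max st.2 (right - (left : Int) + 1))) (0, 0))
    = ((if m = 0 then 0 else L (m - 1)),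
       (PySem.List.pyRange 0 (m : Int) 1).foldl
         (fun (mc : Int) right => max mc (right - ((L right.toNat : Nat) : Int) + 1)) 0) := by
  intro m
  induction m with
  | zero =>
    intro _
    rw [PySem.List.pyRange_one_eq_nil (by omega)]
    rfl
  | succ m ih =>
    intro hm
    have hrange : PySem.List.pyRange 0 ((m + 1 : Nat) : Int) 1
        = PySem.List.pyRange 0 (m : Int) 1 ++ [(m : Int)] := by
      push_cast
      exact PySem.List.pyRange_one_succ_right (by positivity)
    rw [hrange, List.foldl_append, List.foldl_append, ih (by omega)]
    simp only [List.foldl_cons, List.foldl_nil, PySem.List.pyGetD_natCast]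
    have hwhile : solWhile a (a.getD m 0) k (if m = 0 then 0 else L (m - 1)) a.length = L m := by
      apply solWhile_eq a (a.getD m 0) k (L m) (hLlt m (by omega)) (hLstop m (by omega))
      · by_cases hm0 : m = 0
        · simp [hm0]
        · simp only [hm0, if_false]
          exact hLmono (m - 1) m (by omega) (by omega)
      · have := hLlen m (by omega); omega
    rw [hwhile]
    simp

-- the two pure max-folds coincide: a maximal window counted from its right end (A) is the
-- same window counted from its left end (B)
theorem folds_eq (a : List Int) (k : Int) (hs : a.Pairwise (· ≤ ·)) (N : Nat)
    (hN : N ≤ a.length) (L U : Nat → Nat)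
    (hLstop : ∀ r, r < N → a.getD r 0 - a.getD (L r) 0 ≤ k)
    (hLlt : ∀ r, r < N → ∀ j, j < L r → k < a.getD r 0 - a.getD j 0)
    (hUle : ∀ j, j < N → U j ≤ N)
    (hUlo : ∀ j i, j < N → i < U j → a.getD i 0 ≤ a.getD j 0 + k)
    (hUhi : ∀ j i, j < N → U j ≤ i → i < N → a.getD j 0 + k < a.getD i 0) :
    (PySem.List.pyRange 0 (N : Int) 1).foldl
      (fun (mc : Int) right => max mc (right - ((L right.toNat : Nat) : Int) + 1)) 0
    = (PySem.List.pyRange 0 (N : Int) 1).foldl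
      (fun (mc : Int) j => max mc (((U j.toNat : Nat) : Int) - j)) 0 := by
  apply le_antisymm
  · apply foldl_max_le _ _ _ _ 0 (le_foldl_max_init _ _ 0)
    intro r hr
    rw [PySem.List.mem_pyRange_one] at hr
    set rn := r.toNat with hrn
    have hrN : rn < N := by omega
    have hreq : r = (rn : Int) := by omega
    by_cases hk : k < 0
    · have hgt : rn < L rn := by
        by_contra hcon
        push Not at hcon
        have := getD_mono_of_pairwise a hs (L rn) rn hcon (by omega)
        have := hLstop rn hrN
        omega
      calc r - ((L rn : Nat) : Int) + 1 ≤ 0 := by omega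
        _ ≤ _ := le_foldl_max_init _ _ 0
    · push Not at hk
      have hLle : L rn ≤ rn := by
        by_contra hcon
        push Not at hcon
        have := hLlt rn hrN rn hcon
        omega
      have hiN : L rn < N := by omega
      have hU : rn < U (L rn) := by
        by_contra hcon
        push Not at hcon
        have h1 := hUhi (L rn) (U (L rn)) hiN (le_refl _) (by omega)
        have h2 := getD_mono_of_pairwise a hs (U (L rn)) rn hcon (by omega)
        have h3 := hLstop rn hrN
        omega
      have hmem : ((L rn : Nat) : Int) ∈ PySem.List.pyRange 0 (N : Int) 1 := by
        rw [PySem.List.mem_pyRange_one]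
        constructor <;> [positivity; exact_mod_cast hiN]
      have := le_foldl_max (fun j => ((U j.toNat : Nat) : Int) - j) _ _ hmem 0
      simp only [Int.toNat_natCast] at this
      refine le_trans ?_ this
      omega
  · apply foldl_max_le _ _ _ _ 0 (le_foldl_max_init _ _ 0)
    intro j hj
    rw [PySem.List.mem_pyRange_one] at hj
    set jn := j.toNat with hjn
    have hjN : jn < N := by omega
    have hjeq : j = (jn : Int) := by omega
    by_cases hU : U jn ≤ jn
    · calc ((U jn : Nat) : Int) - j ≤ 0 := by omega
        _ ≤ _ := le_foldl_max_init _ _ 0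
    · push Not at hU
      set r := U jn - 1 with hr
      have hrN : r < N := by have := hUle jn hjN; omega
      have hLr : L r ≤ jn := by
        by_contra hcon
        push Not at hcon
        have h1 := hLlt r hrN jn hcon
        have h2 := hUlo jn r hjN (by omega)
        omega
      have hmem : ((r : Nat) : Int) ∈ PySem.List.pyRange 0 (N : Int) 1 := by
        rw [PySem.List.mem_pyRange_one]
        constructor <;> [positivity; exact_mod_cast hrN]
      have := le_foldl_max (fun right => right - ((L right.toNat : Nat) : Int) + 1) _ _ hmem 0
      simp only [Int.toNat_natCast] at this
      refine le_trans ?_ this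
      omega

-- ===== VERDICT (by name: the statement is the Claim_ definition above) =====
theorem solution_spec : Claim_equal_solution := by
  intro n k ms _ hpre
  unfold Spec_solution solution solution_alt
  obtain ⟨h1, h2⟩ := hpre
  have hlen : (PySem.List.sorted ms (fun x => x)).length = ms.length :=
    PySem.List.length_sorted ms (fun x => x) false
  have hs : (PySem.List.sorted ms (fun x => x)).Pairwise (· ≤ ·) :=
    PySem.List.sorted_pairwise ms (fun x => x)
  by_cases hn : n ≤ 0
  · rw [PySem.List.pyRange_one_eq_nil (by omega), if_neg (by omega : ¬ 0 < n)]
    rfl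
  · push Not at hn
    rw [if_pos hn, PySem.List.slice_to _ (le_of_lt hn)]
    set afull := PySem.List.sorted ms (fun x => x) with hafull
    set N := n.toNat with hNdef
    have hNpos : 0 < N := by omega
    have hNlen : N ≤ afull.length := by rw [hlen]; omega
    set aN := List.take N afull with haNdef
    have haN : aN.length = N := by rw [haNdef, List.length_take]; omega
    have hsN : aN.Pairwise (· ≤ ·) := List.Pairwise.sublist (List.take_sublist _ _) hs
    have hget : ∀ i, i < N → aN.getD i 0 = afull.getD i 0 := by
      intro i hi
      rw [List.getD_eq_getElem _ 0 (by omega), List.getD_eq_getElem _ 0 (by omega)]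
      simp [haNdef]
    have h2' := h2.resolve_left (by omega)
    have e1 : n - 1 = ((N - 1 : Nat) : Int) := by omega
    have e2 : (ms.length : Int) - 1 = ((afull.length - 1 : Nat) : Int) := by rw [hlen]; omega
    rw [e1, e2, PySem.List.pyGetD_natCast, PySem.List.pyGetD_natCast] at h2'
    have hLlen : ∀ r, r < N → Lsc (afull.getD r 0) k afull ≤ afull.length - 1 := by
      intro r hr
      have hmono := getD_mono_of_pairwise afull hs r (N - 1) (by omega) (by omega)
      exact Lsc_le_of _ _ _ (afull.length - 1) (by omega) (by omega)
    have hLstop : ∀ r, r < N →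
        afull.getD r 0 - afull.getD (Lsc (afull.getD r 0) k afull) 0 ≤ k := by
      intro r hr
      exact Lsc_stop _ _ _ (by have := hLlen r hr; omega)
    have hLlt : ∀ r, r < N → ∀ j, j < Lsc (afull.getD r 0) k afull →
        k < afull.getD r 0 - afull.getD j 0 := by
      intro r _ j hj
      exact Lsc_lt _ _ _ j hj
    have hLmono : ∀ r s, r ≤ s → s < N →
        Lsc (afull.getD r 0) k afull ≤ Lsc (afull.getD s 0) k afull := by
      intro r s hrs hsN'
      exact Lsc_mono _ _ k (getD_mono_of_pairwise afull hs r s hrs (by omega)) afull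
    have hUspec : ∀ j : Nat,
        ubLoop aN (aN.getD j 0 + k) aN.length 0 aN.length ≤ N ∧
        (∀ i, i < ubLoop aN (aN.getD j 0 + k) aN.length 0 aN.length →
          aN.getD i 0 ≤ aN.getD j 0 + k) ∧
        (∀ i, ubLoop aN (aN.getD j 0 + k) aN.length 0 aN.length ≤ i → i < N →
          aN.getD j 0 + k < aN.getD i 0) := by
      intro j
      have h := Uf_spec aN hsN (aN.getD j 0 + k)
      exact ⟨by rw [← haN]; exact h.1, h.2.1, fun i h1' h2'' => h.2.2 i h1' (by omega)⟩
    have hUlo : ∀ j i, j < N → i < ubLoop aN (aN.getD j 0 + k) aN.length 0 aN.length →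
        afull.getD i 0 ≤ afull.getD j 0 + k := by
      intro j i hj hi
      have hiN : i < N := by have := (hUspec j).1; omega
      rw [← hget i hiN, ← hget j hj]
      exact (hUspec j).2.1 i hi
    have hUhi : ∀ j i, j < N → ubLoop aN (aN.getD j 0 + k) aN.length 0 aN.length ≤ i →
        i < N → afull.getD j 0 + k < afull.getD i 0 := by
      intro j i hj hUi hiN
      rw [← hget i hiN, ← hget j hj]
      exact (hUspec j).2.2 i hUi hiN
    have hA := Aloop afull k N (fun r => Lsc (afull.getD r 0) k afull) hLstop hLlt hLmono
      (fun r hr => by show Lsc (afull.getD r 0) k afull ≤ afull.length; have := hLlen r hr; omega) N (le_refl N)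
    have hfe := folds_eq afull k hs N hNlen (fun r => Lsc (afull.getD r 0) k afull)
      (fun j => ubLoop aN (aN.getD j 0 + k) aN.length 0 aN.length)
      hLstop hLlt (fun j _ => (hUspec j).1) hUlo hUhi
    have hlenN : PySem.List.len aN = ((N : Nat) : Int) := by
      simp [PySem.List.len, haN]
    have hB : (PySem.List.pyRange 0 ((N : Nat) : Int) 1).foldl
        (fun (mc : Int) j =>
          max mc (((ubLoop aN (aN.getD j.toNat 0 + k) aN.length 0 aN.length : Nat) : Int) - j)) 0
      = (PySem.List.enumerate aN 0).foldl
          (fun (best : Int) p =>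
            max best (((ubLoop aN (p.2 + k) aN.length 0 aN.length : Nat) : Int) - p.1)) 0 := by
      rw [PySem.List.enumerate_eq_map_pyRange aN 0, List.foldl_map, hlenN]
      apply PySem.List.foldl_congr_mem
      intro acc x hx
      rw [PySem.List.mem_pyRange_one] at hx
      have hxe : x = ((x.toNat : Nat) : Int) := (Int.toNat_of_nonneg hx.1).symm
      rw [hxe, PySem.List.pyGetD_natCast, Int.toNat_natCast]
    have hneq : n = ((N : Nat) : Int) := by omega
    rw [hneq]
    exact (congrArg Prod.snd hA).trans (hfe.trans hB)
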